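-- pv_equiv track=rewrite | github.com/slacker525600/challenges | project-euler/40s/47.py | my_distinct
-- ===== SOURCE A (Python) =====
-- def my_distinct(aanFactors):
--   dDict = {}
--   bFail = False
--   for anFact in aanFactors:
--     for nFact in anFact:
--       #this may break, but can convert to string... slow but ... effective?
--       if dDict.get(str(nFact)) != None:
--         bFail = True
--         break
--       else:
--         dDict[str(nFact)] = True
--     if bFail:
--       break
--   return not bFail
-- ===== SOURCE B (Python) =====
-- def my_distinct(aanFactors):
--   flat = sorted(str(x) for row in aanFactors for x in row)
--   return all(a != b for a, b in zip(flat, flat[1:]))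
-- ===== Notes on version B (the rewrite author's own statement) =====
-- stated objective: alternative
-- what changed: Replaces A's hash-dict membership loop with early break by sort-then-adjacent-scan: sort the stringified flattened elements and check that no two adjacent entries are equal.
import Mathlib
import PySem

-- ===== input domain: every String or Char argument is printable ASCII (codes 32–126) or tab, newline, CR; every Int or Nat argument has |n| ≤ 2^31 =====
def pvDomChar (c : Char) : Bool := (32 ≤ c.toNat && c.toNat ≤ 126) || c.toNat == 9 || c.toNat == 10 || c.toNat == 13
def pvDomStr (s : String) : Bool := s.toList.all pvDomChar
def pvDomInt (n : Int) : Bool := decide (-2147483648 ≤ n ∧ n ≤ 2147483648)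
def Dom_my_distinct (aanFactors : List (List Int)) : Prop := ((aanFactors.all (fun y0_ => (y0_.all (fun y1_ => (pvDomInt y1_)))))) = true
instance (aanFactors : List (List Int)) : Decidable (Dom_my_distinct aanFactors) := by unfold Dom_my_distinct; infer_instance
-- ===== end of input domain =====

-- B replaces A's hash-dict membership loop (with early break) by sort-then-adjacent-scan; objective: alternative algorithm.

-- ===== PORT A =====
-- inner 'for nFact in anFact' loop: threads the dict, returns (dict, bFail)
def myDistinctInner (d : PySem.Dict String Bool) : List Int → PySem.Dict String Bool × Bool
  | [] => (d, false)
  | n :: rest =>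
    if d.get? (PySem.Int.toStr n) ≠ none then (d, true)
    else myDistinctInner (d.insert (PySem.Int.toStr n) true) rest

-- outer 'for anFact in aanFactors' loop: returns bFail
def myDistinctOuter (d : PySem.Dict String Bool) : List (List Int) → Bool
  | [] => false
  | row :: rest =>
    match myDistinctInner d row with
    | (_, true) => true
    | (d', false) => myDistinctOuter d' rest

def my_distinct (aanFactors : List (List Int)) : Bool :=
  !(myDistinctOuter PySem.Dict.empty aanFactors)

-- ===== PORT B =====
def my_distinct_alt (aanFactors : List (List Int)) : Bool :=
  let flat := PySem.List.sorted (aanFactors.flatMap (fun row => row.map PySem.Int.toStr)) (fun s => s) false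
  (flat.zip (PySem.List.slice flat (some 1) none)).all (fun p => p.1 != p.2)

-- ===== PRECONDITION & SPEC =====
def Spec_my_distinct (aanFactors : List (List Int)) (out : Bool) : Prop := out = my_distinct_alt aanFactors
instance (aanFactors : List (List Int)) (out : Bool) : Decidable (Spec_my_distinct aanFactors out) := by unfold Spec_my_distinct; infer_instance

-- ===== CLAIM (what is proved, stated in full; the proofs are below) =====
def Claim_equal_my_distinct : Prop := ∀ (aanFactors : List (List Int)), Dom_my_distinct aanFactors → Spec_my_distinct aanFactors (my_distinct aanFactors)

-- ===== LEMMAS AND PROOFS =====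

-- B-side: on a ≤-sorted list, no two adjacent entries equal iff the list has no duplicates
theorem pv_adj_scan_nodup (l : List String) (h : l.Pairwise (· ≤ ·)) :
    ((l.zip (l.drop 1)).all (fun p => p.1 != p.2)) = decide l.Nodup := by
  induction l with
  | nil => simp
  | cons a t ih =>
    cases t with
    | nil => simp
    | cons b u =>
      have hpt : (b :: u).Pairwise (· ≤ ·) := h.tail
      have hab : a ≤ b := (List.pairwise_cons.1 h).1 b (by simp)
      have ha_le : ∀ x ∈ b :: u, a ≤ x := (List.pairwise_cons.1 h).1
      have hb_le : ∀ x ∈ u, b ≤ x := (List.pairwise_cons.1 hpt).1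
      have hzip : ((a :: b :: u).zip ((a :: b :: u).drop 1)).all (fun p => p.1 != p.2)
          = ((a != b) && ((b :: u).zip ((b :: u).drop 1)).all (fun p => p.1 != p.2)) := by
        simp [List.zip]
      rw [hzip, ih hpt]
      by_cases he : a = b
      · subst he
        simp [List.Nodup]
      · have hne : (a != b) = true := by simp [he]
        rw [hne, Bool.true_and]
        have hnotmem : a ∉ b :: u := by
          intro hmem
          rcases List.mem_cons.1 hmem with h1 | h1
          · exact he h1
          · exact he (le_antisymm hab (hb_le a h1))
        simp [List.nodup_cons, hnotmem]

-- A-side inner loop: fails iff the row's strings repeat or hit the dict;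
-- on success the new dict's key set is the old one plus the row's strings.
theorem pv_inner_spec (l : List Int) (d : PySem.Dict String Bool) :
    ((myDistinctInner d l).2 = false ↔
      ((l.map PySem.Int.toStr).Nodup ∧ ∀ s ∈ l.map PySem.Int.toStr, d.get? s = none)) ∧
    ((myDistinctInner d l).2 = false →
      ∀ s, ((myDistinctInner d l).1.get? s).isSome =
        ((d.get? s).isSome || decide (s ∈ l.map PySem.Int.toStr))) := by
  induction l generalizing d with
  | nil => simp [myDistinctInner]
  | cons n rest ih =>
    by_cases hd : d.get? (PySem.Int.toStr n) = none
    · have hstep : myDistinctInner d (n :: rest)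
          = myDistinctInner (d.insert (PySem.Int.toStr n) true) rest := by
        simp [myDistinctInner, hd]
      obtain ⟨ih1, ih2⟩ := ih (d.insert (PySem.Int.toStr n) true)
      constructor
      · rw [hstep, ih1]
        simp only [List.map_cons, List.nodup_cons]
        constructor
        · rintro ⟨hnd, hfresh⟩
          refine ⟨⟨fun hmem => ?_, hnd⟩, fun s hs => ?_⟩
          · have := hfresh (PySem.Int.toStr n) hmem
            rw [PySem.Dict.get?_insert] at this
            simp at this
          · rcases List.mem_cons.1 hs with hs' | hs'
            · exact hs' ▸ hd
            · have := hfresh s hs'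
              rw [PySem.Dict.get?_insert] at this
              by_cases he : s = PySem.Int.toStr n
              · simp [he] at this
              · simpa [he] using this
        · rintro ⟨⟨hnn, hnd⟩, hfresh⟩
          refine ⟨hnd, fun s hs => ?_⟩
          have hne : s ≠ PySem.Int.toStr n := fun he => hnn (he ▸ hs)
          rw [PySem.Dict.get?_insert]
          simp only [hne, if_false]
          exact hfresh s (List.mem_cons_of_mem _ hs)
      · intro hok s
        rw [hstep] at hok ⊢
        rw [ih2 hok s, PySem.Dict.get?_insert]
        by_cases he : s = PySem.Int.toStr n
        · subst he; simp [hd]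
        · simp [he]
    · have hstep : myDistinctInner d (n :: rest) = (d, true) := by
        simp [myDistinctInner, hd]
      constructor
      · rw [hstep]
        simp only [List.map_cons]
        constructor
        · intro h; simp at h
        · rintro ⟨_, hfresh⟩
          exact absurd (hfresh (PySem.Int.toStr n) (by simp)) hd
      · intro hok
        rw [hstep] at hok
        simp at hok

-- A-side outer loop, with the dict abstracted by a duplicate-free key list K
theorem pv_outer_spec (rows : List (List Int)) (d : PySem.Dict String Bool)
    (K : List String) (hK : K.Nodup)
    (hd : ∀ s, ((d.get? s).isSome) = decide (s ∈ K)) :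
    myDistinctOuter d rows
      = !(decide ((K ++ rows.flatMap (fun r => r.map PySem.Int.toStr)).Nodup)) := by
  induction rows generalizing d K with
  | nil => simp [myDistinctOuter, hK]
  | cons row rest ih =>
    obtain ⟨h1, h2⟩ := pv_inner_spec row d
    by_cases hfail : (myDistinctInner d row).2 = false
    · obtain ⟨hnd, hfresh⟩ := h1.1 hfail
      have hdisj : ∀ s ∈ row.map PySem.Int.toStr, s ∉ K := by
        intro s hs hK'
        have := hd s
        rw [hfresh s hs] at this
        simp [hK'] at this
      have hstep : myDistinctOuter d (row :: rest)
          = myDistinctOuter (myDistinctInner d row).1 rest := by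
        rw [myDistinctOuter]
        rcases he : myDistinctInner d row with ⟨d', b⟩
        rw [he] at hfail; cases b
        · simp
        · simp at hfail
      rw [hstep, ih _ (K ++ row.map PySem.Int.toStr)
        (by
          rw [List.nodup_append]
          refine ⟨hK, hnd, ?_⟩
          intro a haK b hb he
          exact hdisj b hb (he ▸ haK))
        (by
          intro s
          rw [h2 hfail s, hd s]
          simp [List.mem_append])]
      simp [List.flatMap_cons, List.append_assoc]
    · have hfail' : (myDistinctInner d row).2 = true := by
        cases h : (myDistinctInner d row).2
        · exact absurd h hfail
        · rfl
      have hstep : myDistinctOuter d (row :: rest) = true := by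
        rw [myDistinctOuter]
        rcases he : myDistinctInner d row with ⟨d', b⟩
        rw [he] at hfail'; cases b
        · simp at hfail'
        · simp
      have hbad : ¬ ((row.map PySem.Int.toStr).Nodup ∧
          ∀ s ∈ row.map PySem.Int.toStr, d.get? s = none) := fun h => hfail (h1.2 h)
      have hnotnd : ¬ (K ++ ((row.map PySem.Int.toStr) ++
          rest.flatMap (fun r => r.map PySem.Int.toStr))).Nodup := by
        intro hnd
        rw [← List.append_assoc, List.nodup_append] at hnd
        obtain ⟨hKr, _, _⟩ := hnd
        rw [List.nodup_append] at hKr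
        obtain ⟨_, hr, hdisj⟩ := hKr
        refine hbad ⟨hr, fun s hs => ?_⟩
        have hsK : s ∉ K := fun hK' => hdisj s hK' s hs rfl
        have := hd s
        simp [hsK] at this
        simpa [Option.isSome_eq_false_iff, Option.isNone_iff_eq_none] using this
      rw [hstep]
      simp [List.flatMap_cons, hnotnd]

theorem my_distinct_spec' : ∀ (aanFactors : List (List Int)),
    my_distinct aanFactors = my_distinct_alt aanFactors := by
  intro aan
  have hempty : ∀ s : String, (((PySem.Dict.empty : PySem.Dict String Bool).get? s).isSome)
      = decide (s ∈ ([] : List String)) := by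
    intro s; simp
  rw [my_distinct, pv_outer_spec aan PySem.Dict.empty [] List.nodup_nil hempty,
    my_distinct_alt]
  rw [List.nil_append, Bool.not_not]
  set flat := aan.flatMap (fun row => row.map PySem.Int.toStr) with hflat
  set sl := PySem.List.sorted flat (fun s => s) false with hsl
  have hslice : PySem.List.slice sl (some 1) none = sl.drop 1 := by
    simp [PySem.List.slice_from_one]
  rw [hslice, pv_adj_scan_nodup sl (by simpa using PySem.List.sorted_pairwise flat (fun s => s))]
  have hperm : sl.Perm flat := PySem.List.sorted_perm flat (fun s => s) false
  simp [hperm.nodup_iff]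

-- ===== VERDICT (by name: the statement is the Claim_ definition above) =====
theorem my_distinct_spec : Claim_equal_my_distinct := by
  intro aan _
  exact my_distinct_spec' aan
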